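-- pv_equiv track=rewrite | github.com/afzalsiddique/problem-solving | Problem_Solving_Python/leetcode/lc546.py | removeBoxes
-- ===== SOURCE A (Python) =====
-- from itertools import accumulate,permutations; from math import floor,ceil,sqrt; import operator; import random; import string; from bisect import *; from collections import deque, defaultdict, Counter, OrderedDict; from functools import reduce, cache, cmp_to_key; from heapq import heappop,heappush,heapify; import unittest; from typing import List, Optional, Union; from functools import cache; from operator import lt, gt
-- from itertools import accumulate,permutations; from math import floor,ceil,sqrt; import operator; import random; import string; from bisect import *; from collections import deque, defaultdict, Counter, OrderedDict; from functools import reduce, cache, cmp_to_key; from heapq import heappop,heappush,heapify; import unittest; from typing import List, Optional, Union; from functools import cache; from operator import lt, gt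
--
-- def removeBoxes(boxes: List[int]) -> int:
--     def func(nums:List[int]):
--         if not nums: return 0
--         n=len(nums)
--         count=Counter(nums)
--         minn=min(count,key=lambda x:count[x])
--         i=0
--         while i<n and nums[i]==minn:
--             i+=1
--         j=n-1
--         while j>i and nums[j]==minn:
--             j-=1
--         cnt=i+(n-1-j)
--         score = cnt*cnt
--         while i<j:
--             cnt=0
--             while i<j and nums[i]==minn:
--                 cnt+=1
--                 i+=1
--             score += cnt *cnt
--             i+=1
--         return score + func([x for x in nums if x!=minn])
--
--     return func(boxes)
-- ===== SOURCE B (Python) =====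
-- from collections import Counter
--
-- def removeBoxes(boxes):
--     total = 0
--     nums = list(boxes)
--     while nums:
--         count = Counter(nums)
--         minn = min(count, key=lambda x: count[x])
--         # consecutive-run lengths of minn, one scan
--         runs = []
--         cur = 0
--         for x in nums:
--             if x == minn:
--                 cur += 1
--             else:
--                 if cur:
--                     runs.append(cur)
--                 cur = 0
--         if cur:
--             runs.append(cur)
--         # leading and trailing runs are scored as one group when distinct
--         if len(runs) >= 2 and nums[0] == minn and nums[-1] == minn:
--             runs[0] += runs.pop()
--         total += sum(r * r for r in runs)
--         nums = [x for x in nums if x != minn]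
--     return total
-- ===== Notes on version B (the rewrite author's own statement) =====
-- stated objective: simpler
-- what changed: Each peel's score is computed by extracting the list of consecutive-run lengths of the least-frequent value in one left-to-right scan and merging the leading and trailing runs explicitly, instead of A's two index pointers scanning from both ends plus a nested inner while-loop; the outer recursion becomes an iterative accumulator loop.
import Mathlib
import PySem

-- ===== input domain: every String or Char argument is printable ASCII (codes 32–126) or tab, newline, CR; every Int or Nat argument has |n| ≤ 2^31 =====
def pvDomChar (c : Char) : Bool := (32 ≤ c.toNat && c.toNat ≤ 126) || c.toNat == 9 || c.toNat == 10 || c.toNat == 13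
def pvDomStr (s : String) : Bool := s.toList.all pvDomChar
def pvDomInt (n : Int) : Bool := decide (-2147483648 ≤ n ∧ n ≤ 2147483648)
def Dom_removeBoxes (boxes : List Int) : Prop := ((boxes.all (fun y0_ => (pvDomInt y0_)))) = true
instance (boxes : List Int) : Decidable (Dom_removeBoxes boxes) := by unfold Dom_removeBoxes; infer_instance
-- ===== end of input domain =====

-- B replaces A's two-pointer/index scanning of each peel by a single run-length extraction
-- with an explicit leading+trailing merge, and A's recursion by an iterative accumulator loop
-- (objective: simpler decomposition, same asymptotic cost).

-- ===== PORT A =====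
-- A's `while i<n and nums[i]==minn: i+=1`; the fuel argument only bounds the iteration count
-- (n is always enough, since i increases each step); the index is in range when read, so List.getD is exact
def leadA (nums : List Int) (minn : Int) (n : Nat) : Nat → Nat → Nat
  | 0, i => i
  | fuel + 1, i => if i < n ∧ nums.getD i 0 = minn then leadA nums minn n fuel (i + 1) else i

-- A's `while j>i and nums[j]==minn: j-=1` (fuel = starting j is always enough)
def trailA (nums : List Int) (minn : Int) (i : Nat) : Nat → Nat → Nat
  | 0, j => j
  | fuel + 1, j => if i < j ∧ nums.getD j 0 = minn then trailA nums minn i fuel (j - 1) else j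

-- A's inner `while i<j and nums[i]==minn: cnt+=1; i+=1`; returns the final (i, cnt)
def innerA (nums : List Int) (minn : Int) (j : Nat) : Nat → Nat → Nat → Nat × Nat
  | 0, i, c => (i, c)
  | fuel + 1, i, c => if i < j ∧ nums.getD i 0 = minn then innerA nums minn j fuel (i + 1) (c + 1) else (i, c)

-- A's outer `while i<j: cnt=0; <inner loop>; score += cnt*cnt; i+=1` (i advances every iteration, so fuel = j is enough)
def midA (nums : List Int) (minn : Int) (j : Nat) : Nat → Nat → Int → Int
  | 0, _, score => score
  | fuel + 1, i, score =>
    if i < j then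
      let p := innerA nums minn j (j - i) i 0
      midA nums minn j fuel (p.1 + 1) (score + (p.2 : Int) * (p.2 : Int))
    else score

-- A's recursive `func`; fuel = length of the current list (each call removes at least one
-- occurrence of minn, a key of the Counter, so the fuel is never exhausted).
-- `j <= n-1` throughout the trail scan, so Nat subtraction in `cnt` is exact.
def funcA : Nat → List Int → Int
  | 0, _ => 0
  | fuel + 1, nums =>
    if nums = [] then 0
    else
      let n := nums.length
      let count := PySem.Dict.counter nums
      match PySem.List.min? count.keys (fun x => count.getD x 0) with
      | none => 0  -- unreachable: nums ≠ [] means the Counter has a key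
      | some minn =>
        let i := leadA nums minn n n 0
        let j := trailA nums minn i (n - 1) (n - 1)
        let cnt : Nat := i + (n - 1 - j)
        let score : Int := (cnt : Int) * (cnt : Int)
        let score := midA nums minn j j i score
        score + funcA fuel (nums.filter (fun x => x ≠ minn))

def removeBoxes (boxes : List Int) : Int := funcA boxes.length boxes

-- ===== PORT B =====
-- Source B's single scan collecting the consecutive-run lengths of minn (`cur` = the open run)
def runsB (minn : Int) : List Int → Nat → List Nat
  | [], cur => if cur ≠ 0 then [cur] else []
  | x :: xs, cur =>
    if x = minn then runsB minn xs (cur + 1)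
    else (if cur ≠ 0 then [cur] else []) ++ runsB minn xs 0

-- one peel: runs of minn, leading+trailing merged when they are distinct runs, squares summed
def stepB (nums : List Int) (minn : Int) : Int :=
  let runs := runsB minn nums 0
  let runs' := if 2 ≤ runs.length ∧ nums.headD 0 = minn ∧ nums.getLastD 0 = minn
               then (runs.headD 0 + runs.getLastD 0) :: runs.tail.dropLast
               else runs
  runs'.foldl (fun (s : Int) (r : Nat) => s + (r : Int) * (r : Int)) 0

-- Source B's `while nums:` loop with the running total; same fuel remark as for funcA
def loopB : Nat → List Int → Int → Int
  | 0, _, total => total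
  | fuel + 1, nums, total =>
    if nums = [] then total
    else
      let count := PySem.Dict.counter nums
      match PySem.List.min? count.keys (fun x => count.getD x 0) with
      | none => total  -- unreachable: nums ≠ [] means the Counter has a key
      | some minn => loopB fuel (nums.filter (fun x => x ≠ minn)) (total + stepB nums minn)

def removeBoxes_alt (boxes : List Int) : Int := loopB boxes.length boxes 0

-- ===== PRECONDITION & SPEC =====
def Spec_removeBoxes (boxes : List Int) (out : Int) : Prop := out = removeBoxes_alt boxes
instance (boxes : List Int) (out : Int) : Decidable (Spec_removeBoxes boxes out) := by unfold Spec_removeBoxes; infer_instance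

-- ===== CLAIM (what is proved, stated in full; the proofs are below) =====
def Claim_equal_removeBoxes : Prop := ∀ (boxes : List Int), Dom_removeBoxes boxes → Spec_removeBoxes boxes (removeBoxes boxes)

-- ===== LEMMAS AND PROOFS =====

-- sum of squares of a run list
def sumSqP (rs : List Nat) : Int := (rs.map (fun (r : Nat) => (r : Int) * (r : Int))).sum

theorem foldl_sq (rs : List Nat) (s : Int) :
    rs.foldl (fun (s : Int) (r : Nat) => s + (r : Int) * (r : Int)) s = s + sumSqP rs := by
  induction rs generalizing s with
  | nil => simp [sumSqP]
  | cons r t ih =>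
    rw [List.foldl_cons, ih, sumSqP, sumSqP, List.map_cons, List.sum_cons]
    ring

theorem sumSqP_append (l1 l2 : List Nat) : sumSqP (l1 ++ l2) = sumSqP l1 + sumSqP l2 := by
  simp [sumSqP]

theorem sumSqP_cons (k : Nat) (rs : List Nat) : sumSqP (k :: rs) = (k : Int) * k + sumSqP rs := by
  simp [sumSqP]

theorem sumSqP_flush (k : Nat) : sumSqP (if k ≠ 0 then [k] else []) = (k : Int) * k := by
  by_cases hk : k = 0 <;> simp [hk, sumSqP]

theorem head_dropWhile_false {p : Int → Bool} {l : List Int} {x : Int}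
    (h : (l.dropWhile p).head? = some x) : p x = false := by
  induction l with
  | nil => simp at h
  | cons a t ih =>
    rw [List.dropWhile_cons] at h
    by_cases hpa : p a = true
    · rw [if_pos hpa] at h; exact ih h
    · rw [if_neg hpa] at h
      simp at h
      rw [← h]
      simpa using hpa

theorem lead_spec (nums : List Int) (m : Int) :
    ∀ (fuel i : Nat), nums.length ≤ fuel + i → i ≤ nums.length →
    leadA nums m nums.length fuel i = i + ((nums.drop i).takeWhile (fun x => x = m)).length := by
  intro fuel
  induction fuel with
  | zero =>
    intro i h1 h2
    rw [show leadA nums m nums.length 0 i = i from rfl]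
    simp [List.drop_eq_nil_of_le (show nums.length ≤ i from by omega)]
  | succ fuel ih =>
    intro i h1 h2
    by_cases hc : i < nums.length ∧ nums.getD i 0 = m
    · obtain ⟨hlt, hm⟩ := hc
      rw [show leadA nums m nums.length (fuel + 1) i = leadA nums m nums.length fuel (i + 1) from by
        simp only [leadA]; rw [if_pos ⟨hlt, hm⟩]]
      rw [ih (i + 1) (by omega) (by omega)]
      rw [List.getD_eq_getElem nums 0 hlt] at hm
      rw [List.drop_eq_getElem_cons hlt, List.takeWhile_cons]
      simp [hm]
      omega
    · rw [show leadA nums m nums.length (fuel + 1) i = i from by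
        simp only [leadA]; rw [if_neg hc]]
      rcases Nat.lt_or_ge i nums.length with hlt | hge
      · have hm : ¬ nums.getD i 0 = m := fun hx => hc ⟨hlt, hx⟩
        rw [List.getD_eq_getElem nums 0 hlt] at hm
        rw [List.drop_eq_getElem_cons hlt, List.takeWhile_cons]
        simp [hm]
      · simp [List.drop_eq_nil_of_le hge]

theorem trail_stop (nums : List Int) (m : Int) (i : Nat) (fuel j : Nat)
    (h : ¬(i < j ∧ nums.getD j 0 = m)) : trailA nums m i fuel j = j := by
  cases fuel with
  | zero => rfl
  | succ fuel => simp only [trailA]; rw [if_neg h]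

theorem trail_spec (pre : List Int) (m : Int) (B : Nat) (i : Nat) (hpre : pre ≠ [])
    (hlast : pre.getLast? ≠ some m) (hi : i < pre.length) :
    ∀ b fuel, b ≤ B → pre.length + b - 1 ≤ fuel →
    trailA (pre ++ List.replicate B m) m i fuel (pre.length + b - 1) = pre.length - 1 := by
  have hp1 : 0 < pre.length := List.length_pos_of_ne_nil hpre
  intro b
  induction b with
  | zero =>
    intro fuel _ _
    apply trail_stop
    rintro ⟨hij, hm⟩
    apply hlast
    have hjl : pre.length + 0 - 1 < pre.length := by omega
    have hjl2 : pre.length + 0 - 1 < (pre ++ List.replicate B m).length := by simp; omega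
    rw [List.getD_eq_getElem _ 0 hjl2, List.getElem_append_left hjl] at hm
    rw [List.getLast?_eq_getElem?]
    rw [List.getElem?_eq_getElem (by omega)]
    simp only [Option.some.injEq]
    rw [← hm]
    congr 1
  | succ b ih =>
    intro fuel hb hfuel
    rcases fuel with _ | fuel
    · omega
    · have hj : pre.length + (b + 1) - 1 = pre.length + b := by omega
      rw [hj]
      have hcond : i < pre.length + b ∧ (pre ++ List.replicate B m).getD (pre.length + b) 0 = m := by
        constructor
        · omega
        · have hlen : pre.length + b < (pre ++ List.replicate B m).length := by simp; omega
          rw [List.getD_eq_getElem _ 0 hlen, List.getElem_append_right (by omega)]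
          apply List.getElem_replicate
      rw [show trailA (pre ++ List.replicate B m) m i (fuel + 1) (pre.length + b) =
          trailA (pre ++ List.replicate B m) m i fuel (pre.length + b - 1) from by
        simp only [trailA]; rw [if_pos hcond]]
      exact ih fuel (by omega) (by omega)

theorem inner_spec (nums : List Int) (m : Int) (j : Nat) (hj : j ≤ nums.length) :
    ∀ (fuel i c : Nat), j ≤ fuel + i → i ≤ j →
    innerA nums m j fuel i c =
      (i + min ((nums.drop i).takeWhile (fun x => x = m)).length (j - i),
       c + min ((nums.drop i).takeWhile (fun x => x = m)).length (j - i)) := by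
  intro fuel
  induction fuel with
  | zero =>
    intro i c h1 h2
    rw [show innerA nums m j 0 i c = (i, c) from rfl]
    simp [show j - i = 0 from by omega]
  | succ fuel ih =>
    intro i c h1 h2
    by_cases hc : i < j ∧ nums.getD i 0 = m
    · obtain ⟨hlt, hm⟩ := hc
      have hlen : i < nums.length := by omega
      rw [show innerA nums m j (fuel + 1) i c = innerA nums m j fuel (i + 1) (c + 1) from by
        simp only [innerA]; rw [if_pos ⟨hlt, hm⟩]]
      rw [ih (i + 1) (c + 1) (by omega) (by omega)]
      rw [List.getD_eq_getElem nums 0 hlen] at hm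
      rw [List.drop_eq_getElem_cons hlen, List.takeWhile_cons]
      simp only [hm, decide_true, if_true, List.length_cons, Prod.mk.injEq]
      constructor <;> omega
    · rw [show innerA nums m j (fuel + 1) i c = (i, c) from by
        simp only [innerA]; rw [if_neg hc]]
      rcases Nat.lt_or_ge i j with hlt | hge
      · have hlen : i < nums.length := by omega
        have hm : ¬ nums.getD i 0 = m := fun hx => hc ⟨hlt, hx⟩
        rw [List.getD_eq_getElem nums 0 hlen] at hm
        rw [List.drop_eq_getElem_cons hlen, List.takeWhile_cons]
        simp [hm]
      · simp [show j - i = 0 from by omega]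

theorem mid_stop (nums : List Int) (m : Int) (j : Nat) (fuel i : Nat) (s : Int) (h : j ≤ i) :
    midA nums m j fuel i s = s := by
  cases fuel with
  | zero => rfl
  | succ fuel => simp only [midA]; rw [if_neg (by omega)]

theorem run_rep (m : Int) (k : Nat) (xs : List Int) (c : Nat) :
    runsB m (List.replicate k m ++ xs) c = runsB m xs (c + k) := by
  induction k generalizing c with
  | zero => simp
  | succ k ih =>
    rw [List.replicate_succ, List.cons_append]
    rw [show runsB m (m :: (List.replicate k m ++ xs)) c = runsB m (List.replicate k m ++ xs) (c + 1) from by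
      simp [runsB]]
    rw [ih]
    congr 1
    omega

theorem run_replicate (m : Int) (k c : Nat) :
    runsB m (List.replicate k m) c = if c + k ≠ 0 then [c + k] else [] := by
  have h2 := run_rep m k [] c
  rw [List.append_nil] at h2
  rw [h2]
  rfl

theorem run_cons_ne (m x : Int) (hx : x ≠ m) (xs : List Int) (c : Nat) :
    runsB m (x :: xs) c = (if c ≠ 0 then [c] else []) ++ runsB m xs 0 := by
  simp [runsB, hx]

theorem run_split (m : Int) (xs ys : List Int) (hne : xs ≠ []) (hlast : xs.getLast? ≠ some m) :
    ∀ c, runsB m (xs ++ ys) c = runsB m xs c ++ runsB m ys 0 := by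
  induction xs with
  | nil => exact absurd rfl hne
  | cons z t ih =>
    intro c
    rcases eq_or_ne t [] with ht | ht
    · subst ht
      have hz : z ≠ m := by
        intro hx; apply hlast; simp [hx]
      rw [List.cons_append, List.nil_append, run_cons_ne m z hz, run_cons_ne m z hz]
      simp [runsB]
    · have hlast2 : t.getLast? ≠ some m := by
        rcases t with _ | ⟨w, t'⟩
        · exact absurd rfl ht
        · rwa [List.getLast?_cons_cons] at hlast
      by_cases hz : z = m
      · rw [List.cons_append]
        rw [show runsB m (z :: (t ++ ys)) c = runsB m (t ++ ys) (c + 1) from by simp [runsB, hz]]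
        rw [show runsB m (z :: t) c = runsB m t (c + 1) from by simp [runsB, hz]]
        exact ih ht hlast2 (c + 1)
      · rw [List.cons_append, run_cons_ne m z hz, run_cons_ne m z hz, ih ht hlast2 0]
        simp

theorem run_last_nonm (m x : Int) (hx : x ≠ m) (xs : List Int) (c : Nat) :
    runsB m (xs ++ [x]) c = runsB m xs c := by
  induction xs generalizing c with
  | nil => simp [runsB, hx]
  | cons z t ih =>
    by_cases hz : z = m
    · rw [List.cons_append]
      rw [show runsB m (z :: (t ++ [x])) c = runsB m (t ++ [x]) (c + 1) from by simp [runsB, hz]]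
      rw [show runsB m (z :: t) c = runsB m t (c + 1) from by simp [runsB, hz]]
      exact ih (c + 1)
    · rw [List.cons_append, run_cons_ne m z hz, run_cons_ne m z hz, ih 0]

theorem run_head_nonm (m x : Int) (hx : x ≠ m) (xs : List Int) (c : Nat) :
    runsB m (x :: xs) c = (if c ≠ 0 then [c] else []) ++ runsB m (x :: xs) 0 := by
  rw [run_cons_ne m x hx, run_cons_ne m x hx]
  simp

theorem mid_spec (nums : List Int) (m : Int) (j : Nat) (hj : j ≤ nums.length) :
    ∀ (fuel i : Nat) (s : Int), j ≤ fuel + i → i ≤ j →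
    midA nums m j fuel i s = s + sumSqP (runsB m ((nums.drop i).take (j - i)) 0) := by
  intro fuel
  induction fuel with
  | zero =>
    intro i s h1 h2
    rw [show midA nums m j 0 i s = s from rfl]
    rw [show j - i = 0 from by omega]
    simp [runsB, sumSqP]
  | succ fuel ih =>
    intro i s h1 h2
    by_cases h : i < j
    · rw [show midA nums m j (fuel + 1) i s =
          midA nums m j fuel ((innerA nums m j (j - i) i 0).1 + 1)
            (s + ((innerA nums m j (j - i) i 0).2 : Int) * ((innerA nums m j (j - i) i 0).2 : Int)) from by
        simp only [midA]; rw [if_pos h]]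
      have hp : innerA nums m j (j - i) i 0 =
          (i + min ((nums.drop i).takeWhile (fun x => x = m)).length (j - i),
           0 + min ((nums.drop i).takeWhile (fun x => x = m)).length (j - i)) :=
        inner_spec nums m j hj (j - i) i 0 (by omega) (by omega)
      rw [hp]
      set t := ((nums.drop i).takeWhile (fun x => x = m)).length with ht
      rcases Nat.lt_or_ge t (j - i) with hkl | hke
      · -- the run stops strictly before j, with a non-minn element after it
        simp only [Nat.min_eq_left (Nat.le_of_lt hkl), Nat.zero_add]
        have hd : nums.drop i = List.replicate t m ++ (nums.drop i).dropWhile (fun x => x = m) := by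
          conv_lhs => rw [← List.takeWhile_append_dropWhile (p := fun x => decide (x = m)) (l := nums.drop i)]
          congr 1
          have hmem : ∀ y ∈ (nums.drop i).takeWhile (fun x => x = m), y = m :=
            fun y hy => of_decide_eq_true (List.mem_takeWhile_imp (p := fun x => decide (x = m)) hy)
          have h3 := List.eq_replicate_of_mem hmem
          rwa [← ht] at h3
        have hlen2 : t + ((nums.drop i).dropWhile (fun x => x = m)).length = nums.length - i := by
          have h2 := congrArg List.length (List.takeWhile_append_dropWhile (p := fun x => decide (x = m)) (l := nums.drop i))
          rw [List.length_append, List.length_drop] at h2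
          omega
        have hune : (nums.drop i).dropWhile (fun x => x = m) ≠ [] := by
          intro he
          rw [he] at hlen2
          simp at hlen2
          omega
        obtain ⟨x, u', hu⟩ : ∃ x u', (nums.drop i).dropWhile (fun x => x = m) = x :: u' := by
          rcases hcase : (nums.drop i).dropWhile (fun x => x = m) with _ | ⟨x, u'⟩
          · exact absurd hcase hune
          · exact ⟨x, u', rfl⟩
        have hx : x ≠ m := by
          have h4 := head_dropWhile_false (p := fun y => decide (y = m)) (l := nums.drop i) (x := x) (by rw [hu]; rfl)
          simpa using h4
        have hseg : (nums.drop i).take (j - i) = List.replicate t m ++ x :: u'.take (j - i - t - 1) := by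
          rw [hd, hu, List.take_append, List.take_of_length_le (by simp; omega)]
          congr 1
          rw [show j - i - (List.replicate t m).length = j - i - t from by simp]
          rw [show j - i - t = (j - i - t - 1) + 1 from by omega]
          rfl
        have hdrop2 : nums.drop (i + t + 1) = u' := by
          rw [show i + t + 1 = i + (t + 1) from by omega, ← List.drop_drop, hd, hu]
          rw [List.drop_append]
          simp
        rw [ih (i + t + 1) (s + (t : Int) * (t : Int)) (by omega) (by omega), hdrop2]
        rw [show j - (i + t + 1) = j - i - t - 1 from by omega]
        rw [hseg, run_rep, run_cons_ne m x hx]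
        rw [show 0 + t = t from by omega]
        rw [sumSqP_append]
        by_cases ht0 : t = 0
        · simp [ht0, sumSqP]
        · rw [if_pos (by omega)]
          rw [sumSqP_cons]
          simp [sumSqP]
          ring
      · -- the run reaches the right boundary j
        simp only [Nat.min_eq_right hke, Nat.zero_add]
        rw [show i + (j - i) + 1 = j + 1 from by omega, mid_stop nums m j fuel (j + 1) _ (by omega)]
        have e1 : (nums.drop i).take (j - i) = ((nums.drop i).takeWhile (fun x => x = m)).take (j - i) := by
          conv_lhs => rw [← List.takeWhile_append_dropWhile (p := fun x => decide (x = m)) (l := nums.drop i)]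
          exact List.take_append_of_le_length (by omega)
        have hpre : ∀ y ∈ (nums.drop i).take (j - i), y = m := by
          intro y hy
          rw [e1] at hy
          exact of_decide_eq_true (List.mem_takeWhile_imp (p := fun x => decide (x = m)) (List.mem_of_mem_take hy))
        have hlen : ((nums.drop i).take (j - i)).length = j - i := by
          rw [e1, List.length_take]
          omega
        have hseg : (nums.drop i).take (j - i) = List.replicate (j - i) m := by
          have h3 := List.eq_replicate_of_mem hpre
          rwa [hlen] at h3
        rw [hseg, run_replicate, if_pos (by omega)]
        simp [sumSqP]
    · rw [show midA nums m j (fuel + 1) i s = s from by simp only [midA]; rw [if_neg h]]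
      rw [show j - i = 0 from by omega]
      simp [runsB, sumSqP]

theorem step_eq (nums : List Int) (m : Int) (h : nums ≠ []) :
    midA nums m (trailA nums m (leadA nums m nums.length nums.length 0) (nums.length - 1) (nums.length - 1))
      (trailA nums m (leadA nums m nums.length nums.length 0) (nums.length - 1) (nums.length - 1))
      (leadA nums m nums.length nums.length 0)
      ((((leadA nums m nums.length nums.length 0) + (nums.length - 1 - trailA nums m (leadA nums m nums.length nums.length 0) (nums.length - 1) (nums.length - 1)) : Nat) : Int) *
       (((leadA nums m nums.length nums.length 0) + (nums.length - 1 - trailA nums m (leadA nums m nums.length nums.length 0) (nums.length - 1) (nums.length - 1)) : Nat) : Int))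
      = stepB nums m := by
  have hn1 : 0 < nums.length := List.length_pos_of_ne_nil h
  set a := (nums.takeWhile (fun x => x = m)).length with ha
  have hta : a ≤ nums.length := by
    rw [ha]
    exact List.IsPrefix.length_le (List.takeWhile_prefix _)
  have htw : nums.takeWhile (fun x => x = m) = List.replicate a m := by
    have hmem : ∀ y ∈ nums.takeWhile (fun x => x = m), y = m :=
      fun y hy => of_decide_eq_true (List.mem_takeWhile_imp (p := fun x => decide (x = m)) hy)
    have h3 := List.eq_replicate_of_mem hmem
    rwa [← ha] at h3
  have hlead : leadA nums m nums.length nums.length 0 = a := by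
    have h3 := lead_spec nums m nums.length 0 (by omega) (by omega)
    simpa using h3
  rw [hlead]
  rcases eq_or_ne (nums.dropWhile (fun x => x = m)) [] with hrest | hrest
  · -- every element equals m: one single run, counted once
    have hnums : nums = List.replicate a m := by
      conv_lhs => rw [← List.takeWhile_append_dropWhile (p := fun x => decide (x = m)) (l := nums)]
      rw [hrest, List.append_nil, htw]
    have han : nums.length = a := by rw [hnums]; simp
    have htr : trailA nums m a (nums.length - 1) (nums.length - 1) = nums.length - 1 := by
      apply trail_stop
      rintro ⟨hij, -⟩
      omega
    rw [htr, mid_stop nums m (nums.length - 1) (nums.length - 1) a _ (by omega)]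
    rw [show a + (nums.length - 1 - (nums.length - 1)) = a from by omega]
    simp only [stepB]
    rw [hnums, run_replicate]
    have hfa : (if 0 + a ≠ 0 then [0 + a] else ([] : List Nat)) = [a] := by
      rw [if_pos (by omega)]
      congr 1
      omega
    rw [hfa]
    rw [if_neg (by simp)]
    rw [foldl_sq, sumSqP_cons]
    simp [sumSqP]
  · -- a leading run, a non-empty core not starting/ending with m, and a trailing run
    set rest := nums.dropWhile (fun x => x = m) with hrdef
    have hsplit : nums = List.replicate a m ++ rest := by
      conv_lhs => rw [← List.takeWhile_append_dropWhile (p := fun x => decide (x = m)) (l := nums)]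
      rw [htw]
    obtain ⟨x0, rtl, hrx⟩ : ∃ x0 rtl, rest = x0 :: rtl := by
      rcases hc : rest with _ | ⟨x0, rtl⟩
      · exact absurd hc hrest
      · exact ⟨x0, rtl, rfl⟩
    have hx0 : x0 ≠ m := by
      have h3 := head_dropWhile_false (p := fun y => decide (y = m)) (l := nums) (x := x0) (by rw [← hrdef, hrx]; rfl)
      simpa using h3
    set b := (rest.reverse.takeWhile (fun x => x = m)).length with hb
    have htwr : rest.reverse.takeWhile (fun x => x = m) = List.replicate b m := by
      have hmem : ∀ y ∈ rest.reverse.takeWhile (fun x => x = m), y = m :=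
        fun y hy => of_decide_eq_true (List.mem_takeWhile_imp (p := fun x => decide (x = m)) hy)
      have h3 := List.eq_replicate_of_mem hmem
      rwa [← hb] at h3
    set w := rest.reverse.dropWhile (fun x => x = m) with hwdef
    have hrev : rest.reverse = List.replicate b m ++ w := by
      conv_lhs => rw [← List.takeWhile_append_dropWhile (p := fun x => decide (x = m)) (l := rest.reverse)]
      rw [htwr]
    have hwne : w ≠ [] := by
      intro hw
      rw [hw, List.append_nil] at hrev
      have hx0mem : x0 ∈ rest.reverse := by rw [hrx]; simp
      rw [hrev] at hx0mem
      exact hx0 (List.eq_of_mem_replicate hx0mem)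
    set mid : List Int := w.reverse with hmid
    have hmidne : mid ≠ [] := by simp [hmid, hwne]
    have hrest2 : rest = mid ++ List.replicate b m := by
      have h2 := congrArg List.reverse hrev
      rw [List.reverse_reverse, List.reverse_append, List.reverse_replicate] at h2
      rw [h2, hmid]
    have hmlast : mid.getLast? ≠ some m := by
      rw [hmid, List.getLast?_reverse]
      intro hc
      have h3 := head_dropWhile_false (p := fun y => decide (y = m)) (l := rest.reverse) (x := m) (by rw [← hwdef]; exact hc)
      simp at h3
    set L := mid.length with hL
    have hL1 : 1 ≤ L := by rw [hL]; exact List.length_pos_of_ne_nil hmidne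
    have hnlen : nums.length = a + L + b := by
      rw [hsplit, hrest2]
      simp
      omega
    set pre : List Int := List.replicate a m ++ mid with hpre
    have hprelen : pre.length = a + L := by simp [hpre, hL]
    have hprene : pre ≠ [] := by
      intro hc
      rw [hc] at hprelen
      simp at hprelen
      omega
    have hprelast : pre.getLast? ≠ some m := by
      rw [hpre, List.getLast?_append_of_ne_nil _ hmidne]
      exact hmlast
    have hnums2 : nums = pre ++ List.replicate b m := by
      rw [hsplit, hrest2, hpre, List.append_assoc]
    have htr : trailA nums m a (nums.length - 1) (nums.length - 1) = a + L - 1 := by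
      have h1 := trail_spec pre m b a hprene hprelast (by omega) b (pre.length + b - 1) (le_refl b) (le_refl _)
      rw [← hnums2] at h1
      rw [show nums.length - 1 = pre.length + b - 1 from by omega, h1, hprelen]
    rw [htr]
    rw [show a + (nums.length - 1 - (a + L - 1)) = a + b from by omega]
    rw [mid_spec nums m (a + L - 1) (by omega) (a + L - 1) a _ (by omega) (by omega)]
    have hdropa : nums.drop a = mid ++ List.replicate b m := by
      rw [hsplit, hrest2]
      have h2 := List.drop_left (l₁ := List.replicate a m) (l₂ := mid ++ List.replicate b m)
      rw [List.length_replicate] at h2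
      exact h2
    rw [show a + L - 1 - a = L - 1 from by omega, hdropa]
    have htake : (mid ++ List.replicate b m).take (L - 1) = mid.dropLast := by
      rw [List.take_append_of_le_length (by omega), List.dropLast_eq_take, ← hL]
    rw [htake]
    set R := runsB m mid.dropLast 0 with hR
    have hmg : mid.getLast hmidne ≠ m := by
      intro hc
      apply hmlast
      rw [List.getLast?_eq_some_getLast hmidne, hc]
    have hrunsmid0 : runsB m mid 0 = R := by
      conv_lhs => rw [← List.dropLast_append_getLast hmidne]
      rw [run_last_nonm m _ hmg]
    have hmidhead : mid.head? = some x0 := by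
      have hrh : rest.head? = some x0 := by rw [hrx]; rfl
      rw [hrest2] at hrh
      rcases hc : mid with _ | ⟨y, tl⟩
      · exact absurd hc hmidne
      · rw [hc] at hrh
        simpa using hrh
    obtain ⟨mtl, hmcons⟩ : ∃ mtl, mid = x0 :: mtl := by
      rcases hc : mid with _ | ⟨y, tl⟩
      · exact absurd hc hmidne
      · rw [hc] at hmidhead
        simp at hmidhead
        exact ⟨tl, by rw [hmidhead]⟩
    have hrunsmid : runsB m mid (0 + a) = (if a ≠ 0 then [a] else []) ++ R := by
      rw [hmcons, run_head_nonm m x0 hx0 mtl, ← hmcons, hrunsmid0, Nat.zero_add]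
    have hrunsall : runsB m nums 0 = (if a ≠ 0 then [a] else []) ++ R ++ (if b ≠ 0 then [b] else []) := by
      rw [hsplit, hrest2, run_rep m a _ 0, run_split m mid (List.replicate b m) hmidne hmlast, run_replicate]
      rw [hrunsmid, Nat.zero_add, List.append_assoc]
    have hheadm : a ≠ 0 → nums.headD 0 = m := by
      intro ha0
      rw [hsplit]
      rcases a with _ | a'
      · omega
      · rw [List.replicate_succ]
        rfl
    have hheadx : a = 0 → nums.headD 0 = x0 := by
      intro ha0
      rw [hsplit, ha0, List.replicate_zero, List.nil_append, hrx]
      rfl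
    have hlastm : b ≠ 0 → nums.getLastD 0 = m := by
      intro hb0
      rw [List.getLastD_eq_getLast?, hnums2, List.getLast?_append_of_ne_nil]
      · rw [List.getLast?_replicate, if_neg hb0]
        rfl
      · intro hc
        have h3 := congrArg List.length hc
        simp at h3
        omega
    have hlastx : b = 0 → nums.getLastD 0 = mid.getLast hmidne := by
      intro hb0
      rw [List.getLastD_eq_getLast?, hnums2, hb0, List.replicate_zero, List.append_nil, hpre]
      rw [List.getLast?_append_of_ne_nil _ hmidne, List.getLast?_eq_some_getLast hmidne]
      rfl
    simp only [stepB]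
    rw [hrunsall]
    rcases Nat.eq_zero_or_pos a with ha0 | hapos
    · -- no leading run: nothing to merge
      rw [if_neg ?side1]
      case side1 =>
        rintro ⟨-, hh, -⟩
        rw [hheadx ha0] at hh
        exact hx0 hh
      rw [foldl_sq, sumSqP_append, sumSqP_append, sumSqP_flush, sumSqP_flush, ha0]
      push_cast
      ring
    · rcases Nat.eq_zero_or_pos b with hb0 | hbpos
      · -- no trailing run: nothing to merge
        rw [if_neg ?side2]
        case side2 =>
          rintro ⟨-, -, hl⟩
          rw [hlastx hb0] at hl
          exact hmg hl
        rw [foldl_sq, sumSqP_append, sumSqP_append, sumSqP_flush, sumSqP_flush, hb0]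
        push_cast
        ring
      · -- runs at both ends: merged into one group
        have hfa : (if a ≠ 0 then [a] else ([] : List Nat)) = [a] := if_pos (by omega)
        have hfb : (if b ≠ 0 then [b] else ([] : List Nat)) = [b] := if_pos (by omega)
        rw [hfa, hfb]
        rw [if_pos ?side3]
        case side3 =>
          exact ⟨by simp, hheadm (by omega), hlastm (by omega)⟩
        rw [show [a] ++ R ++ [b] = a :: (R ++ [b]) from by simp]
        simp only [List.headD_cons, List.tail_cons]
        rw [List.getLastD_eq_getLast?]
        rw [show (a :: (R ++ [b])).getLast? = ((a :: R) ++ [b]).getLast? from by simp]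
        rw [List.getLast?_concat, List.dropLast_concat]
        simp only [Option.getD_some]
        rw [foldl_sq, sumSqP_cons]
        ring

theorem loop_eq (fuel : Nat) : ∀ (nums : List Int) (t : Int),
    loopB fuel nums t = t + funcA fuel nums := by
  induction fuel with
  | zero => intro nums t; simp [loopB, funcA]
  | succ fuel ih =>
    intro nums t
    simp only [loopB, funcA]
    by_cases hnil : nums = []
    · simp [hnil]
    · simp only [if_neg hnil]
      rcases hmin : PySem.List.min? (PySem.Dict.counter nums).keys (fun x => (PySem.Dict.counter nums).getD x 0) with _ | minn
      · simp
      · simp only []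
        rw [ih, step_eq nums minn hnil]
        ring

-- ===== VERDICT (by name: the statement is the Claim_ definition above) =====
theorem removeBoxes_spec : Claim_equal_removeBoxes := by
  intro boxes _dom
  unfold Spec_removeBoxes removeBoxes removeBoxes_alt
  rw [loop_eq, zero_add]
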